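-- pv_equiv track=rewrite | github.com/SEpapoulis/MAPT | MAPT/database/parser.py | compress_gaps
-- ===== SOURCE A (Python) =====
-- def compress_gaps(accession,seq):
--     ''' this function produces an encoding of seqs without gaps'''
--     encoding = False
--     current_encoding = [str(),str(),str()]
--     compression = []
--     i=0 #used to count all non - or .
--     e=int() #used to count sequence of - or .
--     for char in seq:
--         #only count when not . or -
--         if encoding:
--             if not (char == '.' or char == '-'):
--                 current_encoding[2] = str(e) #insert e of char
--                 compression.append(','.join(current_encoding))
--                 encoding=False
--                 current_encoding = [str(),str(),str()]
--                 i+=1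
--             else:
--                 e+=1
--         else:
--             if char == '.' or char == '-':
--                 encoding = True
--                 e = 1 #number of char to encode
--                 current_encoding[0] = char #what character
--                 current_encoding[1] = str(i) #start position relative to compression
--             else:
--                 i+=1
--     if current_encoding[0]:
--         current_encoding[2] = str(e) #end position
--         compression.append(','.join(current_encoding))
--     return(accession,';'.join(compression))
-- ===== SOURCE B (Python) =====
-- def compress_gaps(accession, seq):
--     '''this function produces an encoding of seqs without gaps'''
--     # two-pointer run scan: jump over each maximal gap run at once
--     parts = []
--     pos = 0   # non-gap characters seen so far
--     k = 0
--     n = len(seq)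
--     while k < n:
--         if seq[k] in '.-':
--             j = k + 1
--             while j < n and seq[j] in '.-':
--                 j += 1
--             parts.append(','.join([seq[k], str(pos), str(j - k)]))
--             k = j
--         else:
--             pos += 1
--             k += 1
--     return (accession, ';'.join(parts))
-- ===== Notes on version B (the rewrite author's own statement) =====
-- stated objective: alternative
-- what changed: Replaced the per-character boolean encoding-flag state machine with a two-pointer run scan that jumps over each maximal gap run at once and emits its record directly, keeping only a non-gap position counter.
import Mathlib
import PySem

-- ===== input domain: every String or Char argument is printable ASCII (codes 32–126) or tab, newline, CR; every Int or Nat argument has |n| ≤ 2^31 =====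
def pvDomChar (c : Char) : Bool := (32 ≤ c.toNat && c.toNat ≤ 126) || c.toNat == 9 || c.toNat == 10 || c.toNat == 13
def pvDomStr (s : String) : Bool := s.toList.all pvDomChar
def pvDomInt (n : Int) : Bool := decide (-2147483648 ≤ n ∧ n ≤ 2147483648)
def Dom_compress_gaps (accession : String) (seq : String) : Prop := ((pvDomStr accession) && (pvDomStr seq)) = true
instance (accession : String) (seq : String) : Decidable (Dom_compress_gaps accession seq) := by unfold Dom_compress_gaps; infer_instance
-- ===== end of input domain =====

-- B replaces A's per-character encoding-flag state machine by a two-pointer scan that jumps over each maximal gap run at once (alternative decomposition, same output; return value only, no mutation involved).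


-- ===== PORT A =====
-- state: (encoding, current_encoding[0], current_encoding[1], current_encoding[2], compression, i, e)
def stepA (s : Bool × String × String × String × List String × Int × Int) (char : Char) :
    Bool × String × String × String × List String × Int × Int :=
  let (encoding, c0, c1, c2, compression, i, e) := s
  if encoding then
    if ¬ (char = '.' ∨ char = '-') then
      -- current_encoding[2] = str(e); compression.append(','.join(current_encoding)); reset; i += 1
      (false, "", "", "",
        compression ++ [PySem.Str.join "," [c0, c1, PySem.Int.toStr e]], i + 1, e)
    else
      (encoding, c0, c1, c2, compression, i, e + 1)
  else
    if char = '.' ∨ char = '-' then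
      (true, String.singleton char, PySem.Int.toStr i, c2, compression, i, 1)
    else
      (encoding, c0, c1, c2, compression, i + 1, e)

def compress_gaps (accession : String) (seq : String) : String × String :=
  let st := seq.toList.foldl stepA (false, "", "", "", [], 0, 0)
  let (_, c0, c1, _, compression, _, e) := st
  let compression :=
    if c0 ≠ "" then compression ++ [PySem.Str.join "," [c0, c1, PySem.Int.toStr e]]
    else compression
  (accession, PySem.Str.join ";" compression)

-- ===== PORT B =====
def isGapB (c : Char) : Bool := c = '.' || c = '-'   -- seq[k] in '.-'

-- the inner `while j < n and seq[j] in '.-'` scan: number of leading gap chars, and the remainder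
def countRunB : List Char → Int × List Char
  | [] => (0, [])
  | c :: l => if isGapB c then ((countRunB l).1 + 1, (countRunB l).2) else (0, c :: l)

theorem countRunB_length_le : ∀ l : List Char, (countRunB l).2.length ≤ l.length := by
  intro l
  induction l with
  | nil => simp [countRunB]
  | cons c l ih =>
      simp only [countRunB]
      split
      · simpa using Nat.le_succ_of_le ih
      · simp

-- the outer while-loop: at a gap char jump over the whole run and emit its record
def goB : List Char → Int → List String → List String
  | [], _, parts => parts
  | c :: l, pos, parts =>
    if isGapB c then
      goB (countRunB l).2 pos
        (parts ++ [PySem.Str.join ","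
          [String.singleton c, PySem.Int.toStr pos, PySem.Int.toStr (1 + (countRunB l).1)]])
    else goB l (pos + 1) parts
termination_by l => l.length
decreasing_by
  · exact Nat.lt_succ_of_le (countRunB_length_le l)
  · simp

def compress_gaps_alt (accession : String) (seq : String) : String × String :=
  (accession, PySem.Str.join ";" (goB seq.toList 0 []))

-- ===== PRECONDITION & SPEC =====
def Spec_compress_gaps (accession : String) (seq : String) (out : String × String) : Prop := out = compress_gaps_alt accession seq
instance (accession : String) (seq : String) (out : String × String) : Decidable (Spec_compress_gaps accession seq out) := by unfold Spec_compress_gaps; infer_instance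

-- ===== CLAIM (what is proved, stated in full; the proofs are below) =====
def Claim_equal_compress_gaps : Prop := ∀ (accession : String) (seq : String), Dom_compress_gaps accession seq → Spec_compress_gaps accession seq (compress_gaps accession seq)

-- ===== LEMMAS AND PROOFS =====

-- A's finishing step (proof helper)
def finA (st : Bool × String × String × String × List String × Int × Int) : List String :=
  let (_, c0, c1, _, compression, _, e) := st
  if c0 ≠ "" then compression ++ [PySem.Str.join "," [c0, c1, PySem.Int.toStr e]]
  else compression

theorem stepA_false_gap {c : Char} (hg : c = '.' ∨ c = '-') (c0 c1 c2 : String)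
    (comp : List String) (i e : Int) :
    stepA (false, c0, c1, c2, comp, i, e) c
      = (true, String.singleton c, PySem.Int.toStr i, c2, comp, i, 1) := by
  simp [stepA, hg]

theorem stepA_false_non {c : Char} (hg : ¬ (c = '.' ∨ c = '-')) (c0 c1 c2 : String)
    (comp : List String) (i e : Int) :
    stepA (false, c0, c1, c2, comp, i, e) c = (false, c0, c1, c2, comp, i + 1, e) := by
  simp [stepA, hg]

theorem stepA_true_gap {c : Char} (hg : c = '.' ∨ c = '-') (c0 c1 c2 : String)
    (comp : List String) (i e : Int) :
    stepA (true, c0, c1, c2, comp, i, e) c = (true, c0, c1, c2, comp, i, e + 1) := by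
  simp [stepA, hg]

theorem stepA_true_non {c : Char} (hg : ¬ (c = '.' ∨ c = '-')) (c0 c1 c2 : String)
    (comp : List String) (i e : Int) :
    stepA (true, c0, c1, c2, comp, i, e) c
      = (false, "", "", "", comp ++ [PySem.Str.join "," [c0, c1, PySem.Int.toStr e]], i + 1, e) := by
  simp [stepA, hg]

theorem goB_acc_aux : ∀ (n : Nat) (l : List Char), l.length ≤ n →
    ∀ (pos : Int) (parts : List String), goB l pos parts = parts ++ goB l pos [] := by
  intro n
  induction n with
  | zero =>
      intro l hl pos parts
      cases l with
      | nil => simp [goB]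
      | cons c l => simp at hl
  | succ n ih =>
      intro l hl pos parts
      cases l with
      | nil => simp [goB]
      | cons c l =>
        have hl' : l.length ≤ n := by simpa using hl
        by_cases h : isGapB c = true
        · simp only [goB, if_pos h]
          rw [ih _ (le_trans (countRunB_length_le l) hl'),
              ih _ (le_trans (countRunB_length_le l) hl') pos ([] ++ _)]
          simp
        · simp only [goB, if_neg h]
          exact ih l hl' _ parts

theorem goB_acc (l : List Char) (pos : Int) (parts : List String) :
    goB l pos parts = parts ++ goB l pos [] :=
  goB_acc_aux l.length l le_rfl pos parts

theorem key : ∀ (l : List Char) (comp : List String) (i e : Int),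
    (finA (l.foldl stepA (false, "", "", "", comp, i, e)) = comp ++ goB l i []) ∧
    (∀ c0 c1 : String, c0 ≠ "" →
      finA (l.foldl stepA (true, c0, c1, "", comp, i, e)) =
        comp ++ [PySem.Str.join "," [c0, c1, PySem.Int.toStr (e + (countRunB l).1)]]
             ++ goB (countRunB l).2 i []) := by
  intro l
  induction l with
  | nil =>
      intro comp i e
      constructor
      · simp [finA, goB]
      · intro c0 c1 h0
        simp [finA, countRunB, goB, h0]
  | cons c l ih =>
      intro comp i e
      by_cases hg : c = '.' ∨ c = '-'
      · have hgb : isGapB c = true := by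
          rcases hg with h | h <;> simp [isGapB, h]
        have h0 : String.singleton c ≠ "" := by
          rcases hg with h | h <;> subst h <;> decide
        constructor
        · -- false state, gap head: start encoding with e = 1
          rw [List.foldl_cons, stepA_false_gap hg, (ih comp i 1).2 _ _ h0]
          conv_rhs => rw [show goB (c :: l) i [] = goB (countRunB l).2 i
              ([] ++ [PySem.Str.join ","
                [String.singleton c, PySem.Int.toStr i, PySem.Int.toStr (1 + (countRunB l).1)]])
            from by simp only [goB, if_pos hgb]]
          rw [goB_acc ((countRunB l).2) i ([] ++ [PySem.Str.join ","
            [String.singleton c, PySem.Int.toStr i, PySem.Int.toStr (1 + (countRunB l).1)]])]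
          simp
        · -- true state, gap head: e += 1
          intro c0 c1 h0'
          rw [List.foldl_cons, stepA_true_gap hg, (ih comp i (e + 1)).2 _ _ h0']
          have hcr : countRunB (c :: l) = ((countRunB l).1 + 1, (countRunB l).2) := by
            simp [countRunB, hgb]
          rw [hcr]
          have : e + 1 + (countRunB l).1 = e + ((countRunB l).1 + 1) := by ring
          rw [this]
      · have hgb : isGapB c = false := by
          have h2 := not_or.mp hg
          simp [isGapB, h2.1, h2.2]
        constructor
        · -- false state, non-gap head: i += 1
          rw [List.foldl_cons, stepA_false_non hg, (ih comp (i + 1) e).1]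
          simp only [goB, hgb]
          simp
        · -- true state, non-gap head: close the current run
          intro c0 c1 h0
          rw [List.foldl_cons, stepA_true_non hg,
            (ih (comp ++ [PySem.Str.join "," [c0, c1, PySem.Int.toStr e]]) (i + 1) e).1]
          have hcr : countRunB (c :: l) = (0, c :: l) := by simp [countRunB, hgb]
          rw [hcr]
          simp only [goB, hgb]
          simp

-- ===== VERDICT (by name: the statement is the Claim_ definition above) =====
theorem compress_gaps_spec : Claim_equal_compress_gaps := by
  intro accession seq _
  unfold Spec_compress_gaps compress_gaps compress_gaps_alt
  have h := (key seq.toList [] 0 0).1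
  simp only [finA] at h
  rcases hst : seq.toList.foldl stepA (false, "", "", "", [], 0, 0) with ⟨b, c0, c1, c2, comp, i, e⟩
  rw [hst] at h
  simp only at h ⊢
  rw [h]
  simp
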